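-- pv_equiv track=rewrite | github.com/akshaychobe/FSD-Navigation | src/planning/trajectory_planner.py | pair_cones
-- ===== SOURCE A (Python) =====
-- def pair_cones(left_cones, right_cones, y_threshold=30):
--     midpoints = []
--     for lx, ly in left_cones:
--         best_match = None
--         min_y_diff = y_threshold
--         for rx, ry in right_cones:
--             if abs(ly - ry) < min_y_diff:
--                 best_match = (rx, ry)
--                 min_y_diff = abs(ly - ry)
--         if best_match:
--             mx = int((lx + best_match[0]) / 2)
--             my = int((ly + best_match[1]) / 2)
--             midpoints.append((mx, my))
--     return midpoints
-- ===== SOURCE B (Python) =====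
-- def pair_cones(left_cones, right_cones, y_threshold=30):
--     # Index right cones once: for each distinct y, keep the first cone in input
--     # order (its input index and x), then sort the distinct y values so the
--     # nearest y for every left cone is found by binary search in O(log R).
--     first_at_y = {}
--     for i, (rx, ry) in enumerate(right_cones):
--         if ry not in first_at_y:
--             first_at_y[ry] = (i, rx)
--     ys = sorted(first_at_y)
--     midpoints = []
--     for lx, ly in left_cones:
--         # lower bound: first position with ys[pos] >= ly
--         lo, hi = 0, len(ys)
--         while lo < hi:
--             mid = (lo + hi) // 2
--             if ys[mid] < ly:
--                 lo = mid + 1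
--             else:
--                 hi = mid
--         cands = []
--         if lo < len(ys):
--             cands.append(ys[lo])
--         if lo > 0:
--             cands.append(ys[lo - 1])
--         best = None  # (diff, first input index, rx, ry)
--         for y in cands:
--             i, rx = first_at_y[y]
--             d = abs(ly - y)
--             if d < y_threshold and (best is None or (d, i) < (best[0], best[1])):
--                 best = (d, i, rx, y)
--         if best is not None:
--             midpoints.append((int((lx + best[2]) / 2), int((ly + best[3]) / 2)))
--     return midpoints
-- ===== Notes on version B (the rewrite author's own statement) =====
-- stated objective: faster
-- what changed: Instead of scanning all right cones for every left cone, B builds a first-occurrence-by-y index of the right cones once, sorts the distinct y values, and finds each left cone's nearest right y by binary search, breaking ties by the stored input index.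
import Mathlib
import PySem

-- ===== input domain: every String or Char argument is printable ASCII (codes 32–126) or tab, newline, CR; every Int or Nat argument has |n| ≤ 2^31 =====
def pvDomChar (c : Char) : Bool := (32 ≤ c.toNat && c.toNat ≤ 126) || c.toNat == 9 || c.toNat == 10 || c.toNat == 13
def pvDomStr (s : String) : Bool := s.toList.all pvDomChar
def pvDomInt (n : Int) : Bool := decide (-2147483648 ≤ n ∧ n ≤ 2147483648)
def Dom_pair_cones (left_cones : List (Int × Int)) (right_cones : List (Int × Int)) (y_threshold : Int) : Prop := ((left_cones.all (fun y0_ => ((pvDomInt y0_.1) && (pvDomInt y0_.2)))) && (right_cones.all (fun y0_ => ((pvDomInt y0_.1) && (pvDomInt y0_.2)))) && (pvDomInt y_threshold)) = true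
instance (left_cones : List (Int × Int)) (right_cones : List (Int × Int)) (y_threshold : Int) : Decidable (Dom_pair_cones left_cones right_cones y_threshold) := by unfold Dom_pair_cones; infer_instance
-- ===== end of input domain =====

-- B replaces A's inner linear scan over all right cones by a one-time first-occurrence-by-y
-- index of the right cones plus binary search over the sorted distinct y values (faster).


-- ===== PORT A =====
-- inner 'for rx, ry in right_cones' loop carrying (best_match, min_y_diff)
def pcScan (ly : Int) (rs : List (Int × Int)) (best : Option (Int × Int)) (mind : Int) :
    Option (Int × Int) × Int :=
  match rs with
  | [] => (best, mind)
  | (rx, ry) :: t =>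
    if |ly - ry| < mind then pcScan ly t (some (rx, ry)) |ly - ry|
    else pcScan ly t best mind

-- outer 'for lx, ly in left_cones' loop; int((lx+bx)/2) is PySem.Int.truncdiv (exact on Dom:
-- the float division of an int of magnitude ≤ 2^32 by 2 is exact, and int() truncates)
def pcOuter (right_cones : List (Int × Int)) (y_threshold : Int) :
    List (Int × Int) → List (Int × Int)
  | [] => []
  | (lx, ly) :: t =>
    match (pcScan ly right_cones none y_threshold).1 with
    | some (bx, byy) =>
        (PySem.Int.truncdiv (lx + bx) 2, PySem.Int.truncdiv (ly + byy) 2) ::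
          pcOuter right_cones y_threshold t
    | none => pcOuter right_cones y_threshold t

def pair_cones (left_cones : List (Int × Int)) (right_cones : List (Int × Int)) (y_threshold : Int) : List (Int × Int) :=
  pcOuter right_cones y_threshold left_cones

-- ===== PORT B =====
-- 'for i, (rx, ry) in enumerate(right_cones): if ry not in first_at_y: first_at_y[ry] = (i, rx)'
def altIndexGo (i : Int) (rs : List (Int × Int)) (d : PySem.Dict Int (Int × Int)) :
    PySem.Dict Int (Int × Int) :=
  match rs with
  | [] => d
  | (rx, ry) :: t =>
      altIndexGo (i + 1) t (if d.contains ry then d else d.insert ry (i, rx))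

-- the 'while lo < hi' lower-bound binary search; ys[mid] is in range whenever lo < hi ≤ len ys.
-- The fuel argument (hi - lo, the loop variant) only makes the recursion structural: each
-- iteration shrinks hi - lo by at least one, so the fuel never runs out while lo < hi.
def altSearchGo (ys : List Int) (ly : Int) : Nat → Nat → Nat → Nat
  | 0, lo, _ => lo
  | fuel + 1, lo, hi =>
    if lo < hi then
      let mid := (lo + hi) / 2
      if ys.getD mid 0 < ly then altSearchGo ys ly fuel (mid + 1) hi
      else altSearchGo ys ly fuel lo mid
    else lo

def altSearch (ys : List Int) (ly : Int) (lo hi : Nat) : Nat :=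
  altSearchGo ys ly (hi - lo) lo hi

-- 'for y in cands' loop carrying best = None | (diff, first input index, rx, ry);
-- first_at_y[y] never misses (y is a key), so the lookup is getD
def altBestLoop (d : PySem.Dict Int (Int × Int)) (ly thr : Int)
    (cands : List Int) (best : Option (Int × Int × Int × Int)) :
    Option (Int × Int × Int × Int) :=
  match cands with
  | [] => best
  | y :: t =>
      let p := d.getD y (0, 0)
      let dy := |ly - y|
      let best' :=
        if dy < thr then
          match best with
          | none => some (dy, p.1, p.2, y)
          | some b =>
              if dy < b.1 ∨ (dy = b.1 ∧ p.1 < b.2.1) then some (dy, p.1, p.2, y) else some b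
        else best
      altBestLoop d ly thr t best'

-- outer 'for lx, ly in left_cones' loop of B
def altOuter (d : PySem.Dict Int (Int × Int)) (ys : List Int) (y_threshold : Int) :
    List (Int × Int) → List (Int × Int)
  | [] => []
  | (lx, ly) :: t =>
    let lo := altSearch ys ly 0 ys.length
    let cands :=
      (if lo < ys.length then [ys.getD lo 0] else []) ++
      (if 0 < lo then [ys.getD (lo - 1) 0] else [])
    match altBestLoop d ly y_threshold cands none with
    | some w =>
        (PySem.Int.truncdiv (lx + w.2.2.1) 2, PySem.Int.truncdiv (ly + w.2.2.2) 2) ::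
          altOuter d ys y_threshold t
    | none => altOuter d ys y_threshold t

def pair_cones_alt (left_cones : List (Int × Int)) (right_cones : List (Int × Int)) (y_threshold : Int) : List (Int × Int) :=
  let first_at_y := altIndexGo 0 right_cones PySem.Dict.empty
  let ys := PySem.List.sorted first_at_y.keys (fun y => y) false
  altOuter first_at_y ys y_threshold left_cones

-- ===== PRECONDITION & SPEC =====
def Spec_pair_cones (left_cones : List (Int × Int)) (right_cones : List (Int × Int)) (y_threshold : Int) (out : List (Int × Int)) : Prop := out = pair_cones_alt left_cones right_cones y_threshold
instance (left_cones : List (Int × Int)) (right_cones : List (Int × Int)) (y_threshold : Int) (out : List (Int × Int)) : Decidable (Spec_pair_cones left_cones right_cones y_threshold out) := by unfold Spec_pair_cones; infer_instance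

-- ===== CLAIM (what is proved, stated in full; the proofs are below) =====
def Claim_equal_pair_cones : Prop := ∀ (left_cones : List (Int × Int)) (right_cones : List (Int × Int)) (y_threshold : Int), Dom_pair_cones left_cones right_cones y_threshold → Spec_pair_cones left_cones right_cones y_threshold (pair_cones left_cones right_cones y_threshold)

-- ===== LEMMAS AND PROOFS =====

-- reference selection: the first right cone whose |ly - ry| is minimal, if that minimum < thr
def bsF (ly thr : Int) : List (Int × Int) → Option (Int × Int)
  | [] => none
  | r :: t =>
    match bsF ly thr t with
    | some b => if |ly - r.2| ≤ |ly - b.2| then some r else some b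
    | none => if |ly - r.2| < thr then some r else none

theorem bs_lt {ly thr : Int} {t : List (Int × Int)} {b : Int × Int}
    (h : bsF ly thr t = some b) : |ly - b.2| < thr := by
  induction t generalizing b with
  | nil => simp [bsF] at h
  | cons r t ih =>
    simp only [bsF] at h
    cases hb : bsF ly thr t with
    | some b' =>
      simp only [hb] at h
      by_cases h1 : |ly - r.2| ≤ |ly - b'.2|
      · rw [if_pos h1] at h; injection h with h2; subst h2
        exact lt_of_le_of_lt h1 (ih hb)
      · rw [if_neg h1] at h; injection h with h2; subst h2
        exact ih hb
    | none =>
      simp only [hb] at h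
      by_cases h1 : |ly - r.2| < thr
      · rw [if_pos h1] at h; injection h with h2; subst h2; exact h1
      · rw [if_neg h1] at h; cases h

theorem bs_mem {ly thr : Int} {t : List (Int × Int)} {b : Int × Int}
    (h : bsF ly thr t = some b) : b ∈ t := by
  induction t generalizing b with
  | nil => simp [bsF] at h
  | cons r t ih =>
    simp only [bsF] at h
    cases hb : bsF ly thr t with
    | some b' =>
      simp only [hb] at h
      by_cases h1 : |ly - r.2| ≤ |ly - b'.2|
      · rw [if_pos h1] at h; injection h with h2; subst h2; exact List.mem_cons_self ..
      · rw [if_neg h1] at h; injection h with h2; subst h2; exact List.mem_cons_of_mem _ (ih hb)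
    | none =>
      simp only [hb] at h
      by_cases h1 : |ly - r.2| < thr
      · rw [if_pos h1] at h; injection h with h2; subst h2; exact List.mem_cons_self ..
      · rw [if_neg h1] at h; cases h

theorem bs_none {ly thr : Int} {t : List (Int × Int)} :
    bsF ly thr t = none ↔ ∀ r ∈ t, ¬ (|ly - r.2| < thr) := by
  induction t with
  | nil => simp [bsF]
  | cons r t ih =>
    simp only [bsF]
    cases hb : bsF ly thr t with
    | some b' =>
      constructor
      · intro h
        by_cases h1 : |ly - r.2| ≤ |ly - b'.2| <;> simp [h1] at h
      · intro h
        exact absurd (bs_lt hb) (h b' (List.mem_cons_of_mem _ (bs_mem hb)))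
    | none =>
      rw [hb] at ih
      constructor
      · intro h q hq
        by_cases h1 : |ly - r.2| < thr
        · rw [if_pos h1] at h; cases h
        · rw [if_neg h1] at h
          rcases List.mem_cons.1 hq with rfl | hq'
          · exact h1
          · exact (ih.1 rfl) q hq'
      · intro h
        rw [if_neg (h r (List.mem_cons_self ..))]

theorem bs_lower {ly : Int} (t : List (Int × Int)) {m' m : Int} (h : m' ≤ m) :
    bsF ly m' t =
      (match bsF ly m t with
       | some b => if |ly - b.2| < m' then some b else none
       | none => none) := by
  induction t with
  | nil => simp [bsF]
  | cons r t ih =>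
    simp only [bsF]
    cases hb : bsF ly m t with
    | some b =>
      simp only [hb] at ih
      by_cases hb' : |ly - b.2| < m'
      · rw [if_pos hb'] at ih
        simp only [ih]
        by_cases h1 : |ly - r.2| ≤ |ly - b.2|
        · simp only [if_pos h1]
          rw [if_pos (lt_of_le_of_lt h1 hb')]
        · simp only [if_neg h1, if_pos hb']
      · rw [if_neg hb'] at ih
        simp only [ih]
        by_cases h1 : |ly - r.2| < m'
        · rw [if_pos h1]
          have : |ly - r.2| ≤ |ly - b.2| := by omega
          simp only [if_pos this]
          rw [if_pos h1]
        · rw [if_neg h1]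
          by_cases h2 : |ly - r.2| ≤ |ly - b.2|
          · simp only [if_pos h2]; rw [if_neg h1]
          · simp only [if_neg h2]; rw [if_neg hb']
    | none =>
      simp only [hb] at ih
      simp only [ih]
      by_cases h1 : |ly - r.2| < m'
      · rw [if_pos h1]
        have h2 : |ly - r.2| < m := lt_of_lt_of_le h1 h
        simp only [if_pos h2]
        rw [if_pos h1]
      · rw [if_neg h1]
        by_cases h2 : |ly - r.2| < m
        · simp only [if_pos h2]; rw [if_neg h1]
        · simp only [if_neg h2]

theorem scan_eq (ly : Int) (rs : List (Int × Int)) :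
    ∀ (best : Option (Int × Int)) (m : Int),
      pcScan ly rs best m =
        (match bsF ly m rs with
         | some b => (some b, |ly - b.2|)
         | none => (best, m)) := by
  induction rs with
  | nil => intro best m; simp [pcScan, bsF]
  | cons r t ih =>
    intro best m
    obtain ⟨rx, ry⟩ := r
    simp only [pcScan, bsF]
    by_cases h1 : |ly - ry| < m
    · rw [if_pos h1]
      rw [ih (some (rx, ry)) |ly - ry|]
      rw [bs_lower t (le_of_lt h1)]
      cases hb : bsF ly m t with
      | some b =>
        by_cases h2 : |ly - b.2| < |ly - ry|
        · simp only [if_pos h2]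
          have : ¬ |ly - ry| ≤ |ly - b.2| := by omega
          simp [this]
        · simp only [if_neg h2]
          have : |ly - ry| ≤ |ly - b.2| := by omega
          simp [this]
      | none => simp [h1]
    · rw [if_neg h1]
      rw [ih best m]
      cases hb : bsF ly m t with
      | some b =>
        have hblt : |ly - b.2| < m := bs_lt hb
        have : ¬ |ly - ry| ≤ |ly - b.2| := by omega
        simp [this]
      | none => simp [h1]

theorem bs_of_sel {ly thr : Int} {rs : List (Int × Int)} {k : Nat} (hk : k < rs.length)
    (hthr : |ly - rs[k].2| < thr)
    (hmin : ∀ j (hj : j < rs.length), |ly - rs[k].2| ≤ |ly - rs[j].2|)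
    (hstr : ∀ j (hj : j < k), |ly - (rs[j]'(by omega)).2| > |ly - rs[k].2|) :
    bsF ly thr rs = some rs[k] := by
  induction rs generalizing k with
  | nil => simp at hk
  | cons r t ih =>
    simp only [bsF]
    cases k with
    | zero =>
      simp only [List.getElem_cons_zero] at *
      cases hb : bsF ly thr t with
      | some b =>
        have hble : |ly - r.2| ≤ |ly - b.2| := by
          obtain ⟨j, hj, hbj⟩ := List.getElem_of_mem (bs_mem hb)
          have := hmin (j+1) (by simpa using hj)
          simpa [hbj] using this
        simp [hble]
      | none => simp [hthr]
    | succ k' =>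
      simp only [List.getElem_cons_succ] at *
      have hk' : k' < t.length := by simpa using hk
      have hb : bsF ly thr t = some t[k'] := by
        apply ih hk' hthr
        · intro j hj; exact hmin (j+1) (by simpa using hj)
        · intro j hj; exact hstr (j+1) (by omega)
      simp only [hb]
      have hr : |ly - r.2| > |ly - t[k'].2| := by
        have := hstr 0 (by omega); simpa using this
      have : ¬ |ly - r.2| ≤ |ly - t[k'].2| := by omega
      simp [this]

theorem idxGo_nodup (rs : List (Int × Int)) :
    ∀ (i : Int) (d : PySem.Dict Int (Int × Int)), d.keys.Nodup →
      (altIndexGo i rs d).keys.Nodup := by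
  induction rs with
  | nil => intro i d h; simpa [altIndexGo]
  | cons r t ih =>
    intro i d h
    obtain ⟨rx, ry⟩ := r
    simp only [altIndexGo]
    apply ih
    by_cases hc : d.contains ry
    · simpa [hc]
    · simp only [hc, Bool.false_eq_true, ↓reduceIte]
      rw [PySem.Dict.keys_insert_of_not_contains _ _ (by simpa using hc)]
      refine List.Nodup.append h (List.nodup_singleton _) ?_
      intro a ha hb
      simp at hb; subst hb
      exact absurd ((PySem.Dict.contains_iff_mem_keys _ _).2 ha) (by simpa using hc)

theorem idxGo_keys (rs : List (Int × Int)) {y : Int} :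
    ∀ (i : Int) (d : PySem.Dict Int (Int × Int)),
      (y ∈ (altIndexGo i rs d).keys ↔ y ∈ d.keys ∨ ∃ r ∈ rs, r.2 = y) := by
  induction rs with
  | nil => intro i d; simp [altIndexGo]
  | cons r t ih =>
    intro i d
    obtain ⟨rx, ry⟩ := r
    simp only [altIndexGo]
    rw [ih]
    by_cases hc : d.contains ry
    · have hmem : ry ∈ d.keys := (PySem.Dict.contains_iff_mem_keys _ _).1 hc
      simp only [hc, ↓reduceIte, List.mem_cons]
      constructor
      · rintro (h | ⟨r, hr, hy⟩)
        · exact Or.inl h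
        · exact Or.inr ⟨r, Or.inr hr, hy⟩
      · rintro (h | ⟨r, (rfl | hr), hy⟩)
        · exact Or.inl h
        · exact Or.inl (by simpa [← hy] using hmem)
        · exact Or.inr ⟨r, hr, hy⟩
    · simp only [hc, Bool.false_eq_true, ↓reduceIte, PySem.Dict.mem_keys_insert, List.mem_cons]
      constructor
      · rintro ((rfl | h) | ⟨r, hr, hy⟩)
        · exact Or.inr ⟨(rx, y), Or.inl rfl, rfl⟩
        · exact Or.inl h
        · exact Or.inr ⟨r, Or.inr hr, hy⟩
      · rintro (h | ⟨r, (rfl | hr), hy⟩)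
        · exact Or.inl (Or.inr h)
        · exact Or.inl (Or.inl hy.symm)
        · exact Or.inr ⟨r, hr, hy⟩

theorem idxGo_get (rs : List (Int × Int)) {y : Int} {v : Int × Int} :
    ∀ (i0 : Int) (d : PySem.Dict Int (Int × Int)),
      (altIndexGo i0 rs d).get? y = some v →
      d.get? y = some v ∨
        (d.get? y = none ∧ ∃ k : Nat, ∃ hk : k < rs.length,
          v.1 = i0 + (k : Int) ∧ rs[k] = (v.2, y) ∧
          ∀ j (hj : j < k), (rs[j]'(by omega)).2 ≠ y) := by
  induction rs with
  | nil => intro i0 d h; exact Or.inl (by simpa [altIndexGo] using h)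
  | cons r t ih =>
    intro i0 d h
    obtain ⟨rx, ry⟩ := r
    simp only [altIndexGo] at h
    rcases ih (i0 + 1) _ h with h' | ⟨hnone, k, hk, hv1, hvk, hfirst⟩
    · -- lookup already resolved in d'
      by_cases hc : d.contains ry
      · rw [if_pos hc] at h'
        exact Or.inl h'
      · rw [if_neg (by simpa using hc)] at h'  -- hmm contains is Bool
        rw [PySem.Dict.get?_insert] at h'
        by_cases hy : y = ry
        · subst hy
          rw [if_pos rfl] at h'
          injection h' with h''
          refine Or.inr ⟨?_, 0, by simp, by simp [← h''], by simp [← h''], by omega⟩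
          rw [PySem.Dict.get?_eq_none_iff_not_mem_keys]
          intro hm
          exact absurd ((PySem.Dict.contains_iff_mem_keys _ _).2 hm) (by simpa using hc)
        · rw [if_neg hy] at h'
          exact Or.inl h'
    · -- found in t at index k
      have hdnone : d.get? y = none ∧ y ≠ ry := by
        by_cases hc : d.contains ry
        · rw [if_pos hc] at hnone
          refine ⟨hnone, ?_⟩
          rintro rfl
          rw [PySem.Dict.contains_eq_isSome_get?, hnone] at hc
          simp at hc
        · rw [if_neg (by simpa using hc)] at hnone
          rw [PySem.Dict.get?_insert] at hnone
          by_cases hy : y = ry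
          · rw [if_pos hy] at hnone; cases hnone
          · rw [if_neg hy] at hnone; exact ⟨hnone, hy⟩
      refine Or.inr ⟨hdnone.1, k + 1, by simpa using Nat.succ_lt_succ hk, by omega, by simpa using hvk, ?_⟩
      intro j hj
      cases j with
      | zero => simpa using fun h => hdnone.2 h.symm
      | succ j' => exact hfirst j' (by omega)

theorem altSearchGo_post (ys : List Int) (ly : Int) (hs : ys.Pairwise (· < ·)) :
    ∀ (fuel lo hi : Nat), hi - lo ≤ fuel → lo ≤ hi → hi ≤ ys.length →
      (∀ j (hj : j < ys.length), j < lo → ys[j] < ly) →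
      (∀ j (hj : j < ys.length), hi ≤ j → ly ≤ ys[j]) →
      lo ≤ altSearchGo ys ly fuel lo hi ∧ altSearchGo ys ly fuel lo hi ≤ hi ∧
      (∀ j (hj : j < ys.length), j < altSearchGo ys ly fuel lo hi → ys[j] < ly) ∧
      (∀ j (hj : j < ys.length), altSearchGo ys ly fuel lo hi ≤ j → ly ≤ ys[j]) := by
  have hmono := List.pairwise_iff_getElem.1 hs
  intro fuel
  induction fuel with
  | zero =>
    intro lo hi hn hle hhi hlo_inv hhi_inv
    have : hi = lo := by omega
    subst this
    exact ⟨le_refl _, le_refl _, hlo_inv, hhi_inv⟩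
  | succ fuel ih =>
    intro lo hi hn hle hhi hlo_inv hhi_inv
    by_cases hlt : lo < hi
    · have hmid_lt : (lo + hi) / 2 < hi := by omega
      have hmid_ge : lo ≤ (lo + hi) / 2 := by omega
      have hmidlen : (lo + hi) / 2 < ys.length := by omega
      rw [altSearchGo]
      simp only [hlt, if_pos]
      rw [List.getD_eq_getElem ys 0 hmidlen]
      by_cases hc : ys[(lo + hi) / 2] < ly
      · rw [if_pos hc]
        have hres := ih ((lo + hi) / 2 + 1) hi (by omega) (by omega) hhi
          (by
            intro j hj hjlt
            rcases Nat.lt_or_ge j ((lo + hi) / 2) with h | h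
            · exact lt_trans (hmono j _ hj hmidlen h) hc
            · have : j = (lo + hi) / 2 := by omega
              subst this; exact hc)
          hhi_inv
        exact ⟨by omega, by omega, hres.2.2.1, hres.2.2.2⟩
      · rw [if_neg hc]
        have hres := ih lo ((lo + hi) / 2) (by omega) (by omega) (by omega)
          hlo_inv
          (by
            intro j hj hjge
            rcases Nat.lt_or_ge ((lo + hi) / 2) j with h | h
            · have := hmono _ j hmidlen hj h
              omega
            · have : j = (lo + hi) / 2 := by omega
              subst this; omega)
        exact ⟨hres.1, by omega, hres.2.2.1, hres.2.2.2⟩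
    · rw [altSearchGo, if_neg hlt]
      exact ⟨le_refl _, hle, fun j hj hjlt => hlo_inv j hj hjlt, fun j hj hge => hhi_inv j hj (by omega)⟩

theorem altSearch_post (ys : List Int) (ly : Int) (hs : ys.Pairwise (· < ·)) :
    ∀ (n lo hi : Nat), hi - lo = n → lo ≤ hi → hi ≤ ys.length →
      (∀ j (hj : j < ys.length), j < lo → ys[j] < ly) →
      (∀ j (hj : j < ys.length), hi ≤ j → ly ≤ ys[j]) →
      lo ≤ altSearch ys ly lo hi ∧ altSearch ys ly lo hi ≤ hi ∧
      (∀ j (hj : j < ys.length), j < altSearch ys ly lo hi → ys[j] < ly) ∧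
      (∀ j (hj : j < ys.length), altSearch ys ly lo hi ≤ j → ly ≤ ys[j]) := by
  intro n lo hi hn hle hhi h1 h2
  exact altSearchGo_post ys ly hs (hi - lo) lo hi (le_refl _) hle hhi h1 h2

theorem none_case (right : List (Int × Int)) (ly thr : Int) (cands : List Int)
    (hdom : ∀ j (hj : j < right.length), ∃ c ∈ cands,
      |ly - c| ≤ |ly - right[j].2| ∧ (right[j].2 ≠ c → |ly - c| < |ly - right[j].2|))
    (hallthr : ∀ c ∈ cands, ¬ (|ly - c| < thr)) :
    bsF ly thr right = none := by
  rw [bs_none]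
  intro r hr
  obtain ⟨j, hj, rfl⟩ := List.getElem_of_mem hr
  obtain ⟨c, hc, hle, _⟩ := hdom j hj
  have := hallthr c hc
  omega

theorem win_case (right : List (Int × Int)) (ly thr : Int)
    (D : PySem.Dict Int (Int × Int)) (cands : List Int) (ystar : Int)
    (hchar : ∀ c ∈ cands, ∃ (k : Nat) (hk : k < right.length),
      (D.getD c (0, 0)).1 = (k : Int) ∧ (D.getD c (0, 0)).2 = right[k].1 ∧
      right[k].2 = c ∧ ∀ j (hj : j < k), (right[j]'(by omega)).2 ≠ c)
    (hdom : ∀ j (hj : j < right.length), ∃ c ∈ cands,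
      |ly - c| ≤ |ly - right[j].2| ∧ (right[j].2 ≠ c → |ly - c| < |ly - right[j].2|))
    (hyc : ystar ∈ cands) (hthr : |ly - ystar| < thr)
    (hbest : ∀ c ∈ cands, |ly - c| < thr →
      |ly - ystar| < |ly - c| ∨ (|ly - ystar| = |ly - c| ∧ (D.getD ystar (0, 0)).1 ≤ (D.getD c (0, 0)).1)) :
    bsF ly thr right = some ((D.getD ystar (0, 0)).2, ystar) := by
  obtain ⟨ks, hks, hi, hx, hy, hfirst⟩ := hchar ystar hyc
  -- a common bound: the winner's distance is ≤ every candidate's distance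
  have hcle : ∀ c ∈ cands, |ly - ystar| ≤ |ly - c| := by
    intro c hc
    by_cases h : |ly - c| < thr
    · rcases hbest c hc h with h' | ⟨h', _⟩ <;> omega
    · omega
  have hkey : right[ks] = ((D.getD ystar (0, 0)).2, ystar) := by
    rw [hx]; exact Prod.ext rfl hy
  rw [← hkey]
  apply bs_of_sel hks
  · rw [hy]; exact hthr
  · intro j hj
    obtain ⟨c, hc, hle, _⟩ := hdom j hj
    have := hcle c hc
    rw [hy]; omega
  · intro j hj
    have hjlen : j < right.length := by omega
    obtain ⟨c, hc, hle, hstrict⟩ := hdom j hjlen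
    rw [hy]
    by_cases hjc : (right[j]'hjlen).2 = c
    · -- right[j] carries a candidate y; its first occurrence is ≤ j
      obtain ⟨kc, hkc, hic, hxc, hyc2, hfc⟩ := hchar c hc
      have hkcj : kc ≤ j := by
        by_contra hgt
        exact hfc j (by omega) hjc
      rw [hjc]
      by_cases h : |ly - c| < thr
      · rcases hbest c hc h with h' | ⟨h', hidx⟩
        · omega
        · -- distance tie: the winner's first index is smaller, but kc ≤ j < ks
          rw [hi, hic] at hidx
          have : ks ≤ kc := by exact_mod_cast hidx
          omega
      · omega
    · have h1 := hstrict hjc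
      have h2 := hcle c hc
      omega

theorem per_cone (right : List (Int × Int)) (ly thr : Int)
    (D : PySem.Dict Int (Int × Int)) (ys : List Int) (r : Nat) (cands : List Int)
    (hD : D = altIndexGo 0 right PySem.Dict.empty)
    (hys : ys = PySem.List.sorted D.keys (fun y => y) false)
    (hr : r = altSearch ys ly 0 ys.length)
    (hcands : cands = (if r < ys.length then [ys.getD r 0] else []) ++
      (if 0 < r then [ys.getD (r - 1) 0] else [])) :
    (match altBestLoop D ly thr cands none with
     | some w => some (w.2.2.1, w.2.2.2)
     | none => none) = bsF ly thr right := by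
  -- structural facts about the index and the sorted key list
  have hnodupK : D.keys.Nodup := by
    rw [hD]; exact idxGo_nodup right 0 _ (by simp [PySem.Dict.empty])
  have hmemK : ∀ y : Int, y ∈ D.keys ↔ ∃ rr ∈ right, rr.2 = y := by
    intro y; rw [hD, idxGo_keys]
    simp [PySem.Dict.empty]
  have hperm : ys.Perm D.keys := by rw [hys]; exact PySem.List.sorted_perm _ _ _
  have hnodup : ys.Nodup := hperm.nodup_iff.2 hnodupK
  have hle : ys.Pairwise (· ≤ ·) := by
    rw [hys]; exact PySem.List.sorted_pairwise _ _
  have hlt : ys.Pairwise (· < ·) := by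
    have hle' := List.pairwise_iff_getElem.1 hle
    rw [List.pairwise_iff_getElem]
    intro a b ha hb hab
    refine lt_of_le_of_ne (hle' a b ha hb hab) (fun heq => ?_)
    rw [List.Nodup.getElem_inj_iff hnodup] at heq
    omega
  have hmono := List.pairwise_iff_getElem.1 hlt
  have hmemys : ∀ y : Int, y ∈ ys ↔ ∃ rr ∈ right, rr.2 = y := by
    intro y; rw [hys, PySem.List.mem_sorted]; exact hmemK y
  -- characterize the stored (first index, x) for any y in ys
  have hchar0 : ∀ c ∈ ys, ∃ (k : Nat) (hk : k < right.length),
      (D.getD c (0, 0)).1 = (k : Int) ∧ (D.getD c (0, 0)).2 = right[k].1 ∧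
      right[k].2 = c ∧ ∀ j (hj : j < k), (right[j]'(by omega)).2 ≠ c := by
    intro c hc
    have hck : c ∈ D.keys := by rw [hys, PySem.List.mem_sorted] at hc; exact hc
    cases hgv : D.get? c with
    | none => exact absurd hck ((PySem.Dict.get?_eq_none_iff_not_mem_keys _ _).1 hgv)
    | some v =>
      have hgd : D.getD c (0, 0) = v := PySem.Dict.getD_of_get?_eq_some _ _ hgv
      rcases idxGo_get right 0 PySem.Dict.empty (hD ▸ hgv) with h | ⟨_, k, hk, h1, h2, h3⟩
      · simp [PySem.Dict.empty, PySem.Dict.get?] at h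
      · refine ⟨k, hk, ?_, ?_, ?_, h3⟩
        · rw [hgd, h1]; ring
        · rw [hgd, h2]
        · rw [h2]
  -- binary search postcondition
  have hpost := altSearch_post ys ly hlt ys.length 0 ys.length (by omega) (by omega) (le_refl _)
    (fun j hj h => absurd h (by omega)) (fun j hj h => absurd hj (by omega))
  rw [← hr] at hpost
  obtain ⟨-, hrlen, hlo, hhi⟩ := hpost
  -- every right cone is (weakly) dominated by a candidate, strictly if its y is not one
  have hdom : ∀ j (hj : j < right.length), ∃ c ∈ cands,
      |ly - c| ≤ |ly - right[j].2| ∧ (right[j].2 ≠ c → |ly - c| < |ly - right[j].2|) := by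
    intro j hj
    have hyin : right[j].2 ∈ ys := (hmemys _).2 ⟨right[j], List.getElem_mem _, rfl⟩
    obtain ⟨p, hp, hpy⟩ := List.mem_iff_getElem.1 hyin
    by_cases hpr : p < r
    · have h0r : 0 < r := by omega
      have hr1 : r - 1 < ys.length := by omega
      have hgd : ys.getD (r - 1) 0 = ys[r - 1] := List.getD_eq_getElem ys 0 hr1
      refine ⟨ys.getD (r - 1) 0, by simp [hcands, h0r], ?_, ?_⟩
      · rw [hgd, ← hpy]
        have h1 : ys[r - 1] < ly := hlo (r - 1) hr1 (by omega)
        have h2 : ys[p] < ly := hlo p hp hpr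
        have h3 : ys[p] ≤ ys[r - 1] := by
          rcases Nat.lt_or_ge p (r - 1) with h | h
          · exact le_of_lt (hmono p (r - 1) hp hr1 h)
          · have : p = r - 1 := by omega
            simp [this]
        rw [abs_of_nonneg (by omega), abs_of_nonneg (by omega)]
        omega
      · rw [hgd, ← hpy]
        intro hne
        have hpne : p ≠ r - 1 := fun h => hne (by simp [h])
        have h4 : ys[p] < ys[r - 1] := hmono p (r - 1) hp hr1 (by omega)
        have h1 : ys[r - 1] < ly := hlo (r - 1) hr1 (by omega)
        have h2 : ys[p] < ly := hlo p hp hpr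
        rw [abs_of_nonneg (by omega), abs_of_nonneg (by omega)]
        omega
    · have hrl : r < ys.length := by omega
      have hgd : ys.getD r 0 = ys[r] := List.getD_eq_getElem ys 0 hrl
      refine ⟨ys.getD r 0, by simp [hcands, hrl], ?_, ?_⟩
      · rw [hgd, ← hpy]
        have h1 : ly ≤ ys[r] := hhi r hrl (le_refl _)
        have h2 : ly ≤ ys[p] := hhi p hp (by omega)
        have h3 : ys[r] ≤ ys[p] := by
          rcases Nat.lt_or_ge r p with h | h
          · exact le_of_lt (hmono r p hrl hp h)
          · have : p = r := by omega
            simp [this]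
        rw [abs_of_nonpos (by omega), abs_of_nonpos (by omega)]
        omega
      · rw [hgd, ← hpy]
        intro hne
        have hpne : p ≠ r := fun h => hne (by simp [h])
        have h4 : ys[r] < ys[p] := hmono r p hrl hp (by omega)
        have h1 : ly ≤ ys[r] := hhi r hrl (le_refl _)
        rw [abs_of_nonpos (by omega), abs_of_nonpos (by omega)]
        omega
  have hcharC : ∀ c ∈ cands, ∃ (k : Nat) (hk : k < right.length),
      (D.getD c (0, 0)).1 = (k : Int) ∧ (D.getD c (0, 0)).2 = right[k].1 ∧
      right[k].2 = c ∧ ∀ j (hj : j < k), (right[j]'(by omega)).2 ≠ c := by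
    intro c hc
    apply hchar0
    rw [hcands] at hc
    rcases List.mem_append.1 hc with h | h
    · by_cases hrl : r < ys.length
      · simp only [hrl, if_pos, List.mem_singleton] at h
        rw [h, List.getD_eq_getElem ys 0 hrl]
        exact List.getElem_mem _
      · simp [hrl] at h
    · by_cases h0r : 0 < r
      · simp only [h0r, if_pos, List.mem_singleton] at h
        have hr1 : r - 1 < ys.length := by omega
        rw [h, List.getD_eq_getElem ys 0 hr1]
        exact List.getElem_mem _
      · simp [h0r] at h
  -- now evaluate B's candidate loop and compare
  subst hcands
  by_cases hc1 : r < ys.length <;> by_cases hc2 : 0 < r <;>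
    simp only [hc1, hc2, ↓reduceIte, List.singleton_append,
      List.nil_append, List.append_nil] at hdom hcharC ⊢
  · -- two candidates: first ys.getD r 0, then ys.getD (r-1) 0
    simp only [altBestLoop]
    by_cases g1 : |ly - ys.getD r 0| < thr <;>
      by_cases g2 : |ly - ys.getD (r - 1) 0| < thr <;>
        simp only [g1, g2, ↓reduceIte]
    · by_cases g3 : |ly - ys.getD (r - 1) 0| < |ly - ys.getD r 0| ∨
          (|ly - ys.getD (r - 1) 0| = |ly - ys.getD r 0| ∧
            (D.getD (ys.getD (r - 1) 0) (0, 0)).1 < (D.getD (ys.getD r 0) (0, 0)).1) <;>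
        simp only [g3, ↓reduceIte]
      · refine (win_case right ly thr D _ _ hcharC hdom (by simp) g2 ?_).symm
        intro c hc
        rcases List.mem_cons.1 hc with rfl | hc'
        · rcases g3 with h | ⟨h, h'⟩
          · intro _; left; exact h
          · intro _; right; exact ⟨h, le_of_lt h'⟩
        · simp at hc'; subst hc'
          intro _; right; exact ⟨rfl, le_refl _⟩
      · push Not at g3
        refine (win_case right ly thr D _ _ hcharC hdom (by simp) g1 ?_).symm
        intro c hc
        rcases List.mem_cons.1 hc with rfl | hc'
        · intro _; right; exact ⟨rfl, le_refl _⟩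
        · simp at hc'; subst hc'
          intro _
          rcases lt_or_eq_of_le g3.1 with h | h
          · left; exact h
          · right; exact ⟨h, g3.2 h.symm⟩
    · refine (win_case right ly thr D _ _ hcharC hdom (by simp) g1 ?_).symm
      intro c hc
      rcases List.mem_cons.1 hc with rfl | hc'
      · intro _; right; exact ⟨rfl, le_refl _⟩
      · simp at hc'; subst hc'
        intro h; exact absurd h g2
    · refine (win_case right ly thr D _ _ hcharC hdom (by simp) g2 ?_).symm
      intro c hc
      rcases List.mem_cons.1 hc with rfl | hc'
      · intro h; exact absurd h g1
      · simp at hc'; subst hc'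
        intro _; right; exact ⟨rfl, le_refl _⟩
    · refine (none_case right ly thr _ hdom ?_).symm
      intro c hc
      rcases List.mem_cons.1 hc with rfl | hc'
      · exact g1
      · simp at hc'; subst hc'; exact g2
  · -- single candidate ys.getD r 0
    simp only [altBestLoop]
    by_cases g1 : |ly - ys.getD r 0| < thr <;> simp only [g1, ↓reduceIte]
    · refine (win_case right ly thr D _ _ hcharC hdom (by simp) g1 ?_).symm
      intro c hc
      simp at hc; subst hc
      intro _; right; exact ⟨rfl, le_refl _⟩
    · refine (none_case right ly thr _ hdom ?_).symm
      intro c hc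
      simp at hc; subst hc; exact g1
  · -- single candidate ys.getD (r-1) 0
    simp only [altBestLoop]
    by_cases g2 : |ly - ys.getD (r - 1) 0| < thr <;> simp only [g2, ↓reduceIte]
    · refine (win_case right ly thr D _ _ hcharC hdom (by simp) g2 ?_).symm
      intro c hc
      simp at hc; subst hc
      intro _; right; exact ⟨rfl, le_refl _⟩
    · refine (none_case right ly thr _ hdom ?_).symm
      intro c hc
      simp at hc; subst hc; exact g2
  · -- no candidates
    simp only [altBestLoop]
    exact (none_case right ly thr _ hdom (by simp)).symm

theorem outer_eq (right : List (Int × Int)) (thr : Int) (left : List (Int × Int)) :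
    pcOuter right thr left =
      altOuter (altIndexGo 0 right PySem.Dict.empty)
        (PySem.List.sorted (altIndexGo 0 right PySem.Dict.empty).keys (fun y => y) false) thr left := by
  induction left with
  | nil => rfl
  | cons l t ih =>
    obtain ⟨lx, ly⟩ := l
    simp only [pcOuter, altOuter]
    have h1 : (pcScan ly right none thr).1 = bsF ly thr right := by
      rw [scan_eq ly right none thr]
      cases bsF ly thr right <;> rfl
    have h2 := per_cone right ly thr _ _ _ _ rfl rfl rfl rfl
    rw [h1, ← h2]
    cases altBestLoop (altIndexGo 0 right PySem.Dict.empty) ly thr _ none with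
    | none => exact ih
    | some w => simp [ih]

-- ===== VERDICT (by name: the statement is the Claim_ definition above) =====
theorem pair_cones_spec : Claim_equal_pair_cones := by
  intro left right thr _
  unfold Spec_pair_cones pair_cones pair_cones_alt
  exact outer_eq right thr left
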